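-- pv_equiv track=rewrite | github.com/vincent-kk/Basic-Algorithm | 04. Queue/3078.py | solution
-- ===== SOURCE A (Python) =====
-- from typing import List, Tuple
-- from collections import defaultdict, deque
--
-- def solution(N: int, K: int, students: List[int]):
--     friends = defaultdict(deque)
--     good_friend = 0
--     for student in enumerate(students):
--         if student[1] in friends:
--             q = friends[student[1]]
--             while len(q) > 0:
--                 if student[0] - q[0][0] > K:
--                     q.popleft()
--                 else:
--                     break
--             good_friend += len(q)
--             q.append(student)
--         else:
--             friends[student[1]].append(student)
--
--     return good_friend
-- ===== SOURCE B (Python) =====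
-- from collections import defaultdict
--
-- def solution(N, K, students):
--     # Stage 1: group student indices by height.
--     pos = defaultdict(list)
--     for i, h in enumerate(students):
--         pos[h].append(i)
--     # Stage 2: per height, a two-pointer sweep over its increasing index list
--     # counts the pairs at distance <= K; no eviction structure, no counting dict.
--     total = 0
--     for idxs in pos.values():
--         lo = 0
--         for hi in range(len(idxs)):
--             while lo < hi and idxs[hi] - idxs[lo] > K:
--                 lo += 1
--             total += hi - lo
--     return total
-- ===== Notes on version B (the rewrite author's own statement) =====
-- stated objective: faster
-- what changed: Replaced A's single online pass with a defaultdict of lazily-trimmed per-height deques by two staged passes: first group student indices by height, then count pairs per height with a monotone two-pointer sweep (total += hi - lo), with no eviction structure at all.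
import Mathlib
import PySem

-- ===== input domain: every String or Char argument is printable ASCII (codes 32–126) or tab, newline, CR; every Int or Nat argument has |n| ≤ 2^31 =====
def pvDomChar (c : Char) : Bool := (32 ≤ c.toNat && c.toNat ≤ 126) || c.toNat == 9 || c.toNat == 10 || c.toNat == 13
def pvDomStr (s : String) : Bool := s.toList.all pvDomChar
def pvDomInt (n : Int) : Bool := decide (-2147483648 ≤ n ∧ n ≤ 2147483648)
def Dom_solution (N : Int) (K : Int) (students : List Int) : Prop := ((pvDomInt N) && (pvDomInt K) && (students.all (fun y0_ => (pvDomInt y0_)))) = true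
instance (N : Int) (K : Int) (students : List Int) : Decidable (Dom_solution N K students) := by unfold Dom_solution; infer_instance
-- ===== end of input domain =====

-- B replaces A's single online pass (dict of lazily-trimmed per-height deques) by two
-- staged passes: group indices by height, then a per-height two-pointer sweep; same result,
-- measurably faster by a constant factor (no per-step dict/deque maintenance).

-- ===== PORT A =====
-- A's inner `while len(q) > 0: if i - q[0][0] > K: popleft else break`
def trimA (i K : Int) : List (Int × Int) → List (Int × Int)
  | [] => []
  | p :: rest => if i - p.1 > K then trimA i K rest else p :: rest

-- one iteration of A's `for student in enumerate(students)` body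
def stepA (K : Int) (st : PySem.Dict Int (List (Int × Int)) × Int) (s : Int × Int) :
    PySem.Dict Int (List (Int × Int)) × Int :=
  match st.1.get? s.2 with      -- `if student[1] in friends`
  | some q =>
      let q' := trimA s.1 K q
      (st.1.insert s.2 (q' ++ [s]), st.2 + (q'.length : Int))
  | none => (st.1.insert s.2 [s], st.2)

def solution (N : Int) (K : Int) (students : List Int) : Int :=
  ((PySem.List.enumerate students 0).foldl (stepA K) (PySem.Dict.empty, 0)).2

-- ===== PORT B =====
-- Source B stage 1: `pos[h].append(i)` over `enumerate(students)`
def groupStep (d : PySem.Dict Int (List Int)) (p : Int × Int) : PySem.Dict Int (List Int) :=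
  d.modify p.2 [] (fun cur => cur ++ [p.1])

-- Source B's `while lo < hi and idxs[hi] - idxs[lo] > K: lo += 1` (the guard keeps lo in range)
def loAdv (K : Int) (idxs : List Int) (hi : Nat) (lo : Nat) : Nat :=
  if h : lo < hi ∧ idxs.getD hi 0 - idxs.getD lo 0 > K then loAdv K idxs hi (lo + 1) else lo
termination_by hi - lo
decreasing_by omega

-- Source B's inner `for hi in range(len(idxs)): … total += hi - lo` (state = (lo, total))
def pairCount (K : Int) (idxs : List Int) : Int :=
  ((List.range idxs.length).foldl
    (fun st hi =>
      let lo := loAdv K idxs hi st.1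
      (lo, st.2 + ((hi : Int) - (lo : Int))))
    (0, 0)).2

def solution_alt (N : Int) (K : Int) (students : List Int) : Int :=
  (((PySem.List.enumerate students 0).foldl groupStep PySem.Dict.empty).values).foldl
    (fun t idxs => t + pairCount K idxs) 0

-- ===== PRECONDITION & SPEC =====
def Spec_solution (N : Int) (K : Int) (students : List Int) (out : Int) : Prop := out = solution_alt N K students
instance (N : Int) (K : Int) (students : List Int) (out : Int) : Decidable (Spec_solution N K students out) := by unfold Spec_solution; infer_instance

-- ===== CLAIM (what is proved, stated in full; the proofs are below) =====
def Claim_equal_solution : Prop := ∀ (N : Int) (K : Int) (students : List Int), Dom_solution N K students → Spec_solution N K students (solution N K students)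

-- ===== LEMMAS AND PROOFS =====

-- reference: at each (i, h), count earlier same-height entries within distance K
def ref (K : Int) : List (Int × Int) → List (Int × Int) → Int
  | _, [] => 0
  | seen, p :: rest =>
      (seen.countP (fun q => q.2 == p.2 && !decide (p.1 - q.1 > K)) : Int) +
        ref K (seen ++ [p]) rest

-- the index list of height h, in order
def grp (E : List (Int × Int)) (h : Int) : List Int :=
  (E.filter (fun p => p.2 == h)).map (·.1)

-- reference per-height count: for each i, earlier same-height indices within K
def cntS (K : Int) : List Int → List Int → Int
  | _, [] => 0
  | prev, i :: r => (prev.countP (fun j => !decide (i - j > K)) : Int) + cntS K (prev ++ [i]) r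

-- grouped reference sum
def RSum (K : Int) (E : List (Int × Int)) : Int :=
  ((PySem.Set.ofList (E.map (·.2))).map (fun h => cntS K [] (grp E h))).sum

-- ---------- A-side (as before): A = ref ----------

def InvDh (K n : Int) (seen : List (Int × Int))
    (d : PySem.Dict Int (List (Int × Int))) (h : Int) : Prop :=
  match d.get? h with
  | none => seen.filter (fun p => p.2 == h) = []
  | some q => ∃ dr, seen.filter (fun p => p.2 == h) = dr ++ q ∧
      ∀ p ∈ dr, decide (n - p.1 > K) = true

lemma trim_split (i K : Int) (q : List (Int × Int))
    (hq : q.Pairwise (fun a b => a.1 < b.1)) :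
    q = q.filter (fun p => decide (i - p.1 > K)) ++ trimA i K q ∧
      trimA i K q = q.filter (fun p => !decide (i - p.1 > K)) := by
  induction q with
  | nil => simp [trimA]
  | cons p rest ih =>
    rcases List.pairwise_cons.mp hq with ⟨hall, hrest⟩
    by_cases hgt : i - p.1 > K
    · have := ih hrest
      simp [trimA, hgt]
      exact ⟨this.1, this.2⟩
    · have hall' : ∀ x ∈ rest, ¬(i - x.1 > K) := fun x hx => by have := hall x hx; omega
      have h1 : List.filter (fun p => decide (i - p.1 > K)) (p :: rest) = [] := by
        rw [List.filter_eq_nil_iff]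
        intro x hx
        rcases List.mem_cons.mp hx with h | h
        · subst h; simpa using hgt
        · simpa using hall' x h
      have h2 : List.filter (fun p => !decide (i - p.1 > K)) (p :: rest) = p :: rest := by
        rw [List.filter_eq_self]
        intro x hx
        rcases List.mem_cons.mp hx with h | h
        · subst h; simpa using hgt
        · simpa using hall' x h
      rw [h1, h2]
      simp [trimA, hgt]

lemma count_shift (K n x : Int) (seen dr q : List (Int × Int))
    (hdr : seen.filter (fun p => p.2 == x) = dr ++ q)
    (hdrK : ∀ p ∈ dr, decide (n - p.1 > K) = true) :
    seen.countP (fun p => p.2 == x && !decide (n - p.1 > K)) =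
      q.countP (fun p => !decide (n - p.1 > K)) := by
  have h1 : seen.countP (fun p => p.2 == x && !decide (n - p.1 > K))
      = (seen.filter (fun p => p.2 == x)).countP (fun p => !decide (n - p.1 > K)) := by
    rw [List.countP_filter]
    exact List.countP_congr (fun a _ => by rw [Bool.and_comm])
  have h2 : dr.countP (fun p => !decide (n - p.1 > K)) = 0 := by
    rw [List.countP_eq_zero]
    intro a ha
    simp [hdrK a ha]
  rw [h1, hdr, List.countP_append, h2, Nat.zero_add]

lemma A_loop (K : Int) (xs : List Int) :
    ∀ (n : Int) (seen : List (Int × Int)) (d : PySem.Dict Int (List (Int × Int))) (g : Int),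
    seen.Pairwise (fun a b => a.1 < b.1) →
    (∀ p ∈ seen, p.1 < n) →
    (∀ h, InvDh K n seen d h) →
    ((PySem.List.enumerate xs n).foldl (stepA K) (d, g)).2 =
      g + ref K seen (PySem.List.enumerate xs n) := by
  induction xs with
  | nil => intro n seen d g _ _ _; simp [PySem.List.enumerate_nil, ref]
  | cons x xs ih =>
    intro n seen d g hst hlt hinv
    rw [PySem.List.enumerate_cons]
    simp only [List.foldl_cons, ref]
    have hst' : (seen ++ [(n, x)]).Pairwise (fun a b => a.1 < b.1) := by
      rw [List.pairwise_append]
      exact ⟨hst, by simp, fun a ha b hb => by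
        rcases List.mem_singleton.mp hb with rfl
        exact hlt a ha⟩
    have hlt' : ∀ p ∈ seen ++ [(n, x)], p.1 < n + 1 := by
      intro p hp
      rcases List.mem_append.mp hp with h | h
      · have := hlt p h; omega
      · rcases List.mem_singleton.mp h with rfl; omega
    have hne_filter : ∀ h : Int, h ≠ x →
        (seen ++ [(n, x)]).filter (fun p => p.2 == h) = seen.filter (fun p => p.2 == h) := by
      intro h hne
      rw [List.filter_append]
      simp [show (x == h) = false from by simpa using fun a => hne a.symm]
    cases hq : d.get? x with
    | none =>
      have hfx : seen.filter (fun p => p.2 == x) = [] := by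
        have := hinv x; rw [InvDh, hq] at this; exact this
      have hcnt : seen.countP (fun q => q.2 == x && !decide (n - q.1 > K)) = 0 :=
        count_shift K n x seen [] [] (by simpa using hfx) (by simp)
      have hstep : stepA K (d, g) (n, x) = (d.insert x [(n, x)], g) := by
        simp [stepA, hq]
      rw [hstep]
      rw [ih (n + 1) (seen ++ [(n, x)]) _ g hst' hlt' ?_]
      · simp [hcnt]
      · intro h
        rw [InvDh, PySem.Dict.get?_insert]
        by_cases hh : h = x
        · subst hh
          rw [if_pos rfl]
          refine ⟨[], ?_, by simp⟩
          rw [List.filter_append, hfx]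
          simp
        · rw [if_neg hh, hne_filter h hh]
          have := hinv h
          rw [InvDh] at this
          cases hq' : d.get? h with
          | none => rw [hq'] at this; exact this
          | some q' =>
            rw [hq'] at this
            obtain ⟨dr, hdr, hdrK⟩ := this
            exact ⟨dr, hdr, fun p hp => by have := hdrK p hp; simp at this ⊢; omega⟩
    | some q =>
      have hinvx := hinv x
      rw [InvDh, hq] at hinvx
      obtain ⟨dr, hdr, hdrK⟩ := hinvx
      have hqsort : q.Pairwise (fun a b => a.1 < b.1) := by
        have := (hst.filter (fun p => p.2 == x))
        rw [hdr] at this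
        exact (List.pairwise_append.mp this).2.1
      obtain ⟨hsplit, htrim⟩ := trim_split n K q hqsort
      have hcnt : seen.countP (fun p => p.2 == x && !decide (n - p.1 > K)) =
          (trimA n K q).length := by
        rw [count_shift K n x seen dr q hdr hdrK, htrim, List.countP_eq_length_filter]
      have hstep : stepA K (d, g) (n, x) =
          (d.insert x (trimA n K q ++ [(n, x)]), g + ((trimA n K q).length : Int)) := by
        simp [stepA, hq]
      rw [hstep]
      rw [ih (n + 1) (seen ++ [(n, x)]) _ _ hst' hlt' ?_]
      · rw [hcnt]; ring
      · intro h
        rw [InvDh, PySem.Dict.get?_insert]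
        by_cases hh : h = x
        · subst hh
          rw [if_pos rfl]
          refine ⟨dr ++ q.filter (fun p => decide (n - p.1 > K)), ?_, ?_⟩
          · have hsing : List.filter (fun p => p.2 == h) [(n, h)] = [(n, h)] := by simp
            rw [List.filter_append, hdr, hsing]
            conv_lhs => rw [hsplit]
            simp [List.append_assoc]
          · intro p hp
            rcases List.mem_append.mp hp with h | h
            · have := hdrK p h; simp at this ⊢; omega
            · have := (List.mem_filter.mp h).2; simp at this ⊢; omega
        · rw [if_neg hh, hne_filter h hh]
          have := hinv h
          rw [InvDh] at this
          cases hq' : d.get? h with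
          | none => rw [hq'] at this; exact this
          | some q' =>
            rw [hq'] at this
            obtain ⟨dr', hdr', hdrK'⟩ := this
            exact ⟨dr', hdr', fun p hp => by have := hdrK' p hp; simp at this ⊢; omega⟩

-- ---------- regrouping: ref = RSum ----------

lemma ref_append (K : Int) (l : List (Int × Int)) :
    ∀ (s : List (Int × Int)) (p : Int × Int),
    ref K s (l ++ [p]) = ref K s l +
      ((s ++ l).countP (fun q => q.2 == p.2 && !decide (p.1 - q.1 > K)) : Int) := by
  induction l with
  | nil => intro s p; simp [ref]
  | cons a l ih =>
    intro s p
    simp only [List.cons_append, ref, ih (s ++ [a]) p, List.append_assoc,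
      List.nil_append]
    ring

lemma cntS_snoc (K : Int) (a : List Int) :
    ∀ (prev : List Int) (n : Int),
    cntS K prev (a ++ [n]) = cntS K prev a +
      (((prev ++ a).countP (fun j => !decide (n - j > K))) : Int) := by
  induction a with
  | nil => intro prev n; simp [cntS]
  | cons i a ih =>
    intro prev n
    simp only [List.cons_append, cntS, ih (prev ++ [i]) n, List.append_assoc,
      List.nil_append]
    ring

lemma countP_grp (E : List (Int × Int)) (x n K : Int) :
    E.countP (fun q => q.2 == x && !decide (n - q.1 > K)) =
      (grp E x).countP (fun j => !decide (n - j > K)) := by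
  unfold grp
  rw [List.countP_map, List.countP_filter]
  exact List.countP_congr (fun a _ => by simp [Function.comp, Bool.and_comm])

lemma grp_append_singleton (E : List (Int × Int)) (p : Int × Int) (h : Int) :
    grp (E ++ [p]) h = grp E h ++ if p.2 == h then [p.1] else [] := by
  unfold grp
  rw [List.filter_append, List.map_append]
  congr 1
  by_cases hph : p.2 == h <;> simp [hph]

lemma sum_map_update (c : Int) (f f' : Int → Int) (x : Int) :
    ∀ (S : List Int), S.Nodup → x ∈ S → (∀ h, h ≠ x → f' h = f h) → f' x = f x + c →
    (S.map f').sum = (S.map f).sum + c := by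
  intro S
  induction S with
  | nil => intro _ hx; simp at hx
  | cons a S ih =>
    intro hnd hx hne hx'
    rcases List.mem_cons.mp hx with rfl | hx
    · have : ∀ h ∈ S, f' h = f h := by
        intro h hh
        exact hne h (fun e => (List.nodup_cons.mp hnd).1 (e ▸ hh))
      simp only [List.map_cons, List.sum_cons, hx']
      rw [List.map_congr_left this]
      ring
    · have ha : a ≠ x := fun e => (List.nodup_cons.mp hnd).1 (e ▸ hx)
      simp only [List.map_cons, List.sum_cons,
        ih (List.nodup_cons.mp hnd).2 hx hne hx', hne a ha]
      ring

lemma ref_eq_RSum (K : Int) (E : List (Int × Int)) : ref K [] E = RSum K E := by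
  induction E using List.reverseRecOn with
  | nil => simp [ref, RSum, PySem.Set.ofList_nil]
  | append_singleton E p ih =>
    rw [ref_append K E [] p, ih]
    simp only [List.nil_append]
    rw [countP_grp E p.2 p.1 K]
    unfold RSum
    simp only [List.map_append, List.map_cons, List.map_nil]
    rw [PySem.Set.ofList_append_singleton]
    by_cases hx : p.2 ∈ PySem.Set.ofList (E.map (·.2))
    · rw [PySem.Set.add_of_mem hx]
      rw [sum_map_update ((grp E p.2).countP (fun j => !decide (p.1 - j > K)) : Int)
        (fun h => cntS K [] (grp E h)) (fun h => cntS K [] (grp (E ++ [p]) h)) p.2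
        _ (PySem.Set.nodup_ofList _) hx ?_ ?_]
      · intro h hne
        beta_reduce
        rw [grp_append_singleton]
        simp [show (p.2 == h) = false from by simpa using fun e => hne e.symm]
      · beta_reduce
        rw [grp_append_singleton]
        simp only [beq_self_eq_true, if_pos]
        rw [cntS_snoc]
        simp
    · rw [PySem.Set.add_of_not_mem hx]
      have hgrpnil : grp E p.2 = [] := by
        unfold grp
        rw [List.map_eq_nil_iff, List.filter_eq_nil_iff]
        intro q hq hq2
        exact hx ((PySem.Set.mem_ofList _ _).mpr (List.mem_map.mpr ⟨q, hq, by simpa using hq2⟩))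
      have hterms : ∀ h ∈ PySem.Set.ofList (E.map (·.2)),
          cntS K [] (grp (E ++ [p]) h) = cntS K [] (grp E h) := by
        intro h hh
        rw [grp_append_singleton]
        have : (p.2 == h) = false := by
          simp only [beq_eq_false_iff_ne, ne_eq]
          intro e; exact hx (e ▸ hh)
        simp [this]
      rw [List.map_append, List.sum_append, List.map_congr_left hterms]
      simp [grp_append_singleton, hgrpnil, cntS]

-- ---------- B-side: pairCount = cntS on sorted lists ----------

lemma getD_mono_of_sorted (idxs : List Int) (hs : idxs.Pairwise (· < ·)) :
    ∀ s t : Nat, s ≤ t → t < idxs.length → idxs.getD s 0 ≤ idxs.getD t 0 := by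
  intro s t hst ht
  rcases Nat.lt_or_ge s t with h | h
  · have := List.pairwise_iff_getElem.mp hs s t (lt_trans h ht) ht h
    rw [List.getD_eq_getElem idxs 0 (lt_trans h ht), List.getD_eq_getElem idxs 0 ht]
    omega
  · have : s = t := le_antisymm hst h
    subst this; rfl

lemma loAdv_spec (K : Int) (idxs : List Int) (hi : Nat) :
    ∀ lo : Nat, lo ≤ hi →
    lo ≤ loAdv K idxs hi lo ∧ loAdv K idxs hi lo ≤ hi ∧
    (∀ s, lo ≤ s → s < loAdv K idxs hi lo → idxs.getD hi 0 - idxs.getD s 0 > K) ∧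
    (loAdv K idxs hi lo < hi → ¬(idxs.getD hi 0 - idxs.getD (loAdv K idxs hi lo) 0 > K)) := by
  have H : ∀ (n lo : Nat), hi - lo ≤ n → lo ≤ hi →
      lo ≤ loAdv K idxs hi lo ∧ loAdv K idxs hi lo ≤ hi ∧
      (∀ s, lo ≤ s → s < loAdv K idxs hi lo → idxs.getD hi 0 - idxs.getD s 0 > K) ∧
      (loAdv K idxs hi lo < hi → ¬(idxs.getD hi 0 - idxs.getD (loAdv K idxs hi lo) 0 > K)) := by
    intro n
    induction n with
    | zero =>
      intro lo hn hle
      have heq : lo = hi := by omega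
      rw [loAdv, dif_neg (by omega)]
      exact ⟨le_refl _, hle, fun s h1 h2 => absurd h1 (by omega), fun hlt => absurd hlt (by omega)⟩
    | succ n ih =>
      intro lo hn hle
      rw [loAdv]
      by_cases hc : lo < hi ∧ idxs.getD hi 0 - idxs.getD lo 0 > K
      · rw [dif_pos hc]
        obtain ⟨h1, h2, h3, h4⟩ := ih (lo + 1) (by omega) (by omega)
        refine ⟨by omega, h2, ?_, h4⟩
        intro s hs1 hs2
        rcases Nat.lt_or_ge s (lo + 1) with h | h
        · have : s = lo := by omega
          subst this
          exact hc.2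
        · exact h3 s h hs2
      · rw [dif_neg hc]
        refine ⟨le_refl _, hle, fun s h1 h2 => absurd h1 (by omega), fun hlt hk => hc ⟨hlt, hk⟩⟩
  exact fun lo hle => H (hi - lo) lo le_rfl hle

lemma countP_take_eq (K v : Int) (idxs : List Int)
    (hi lo' : Nat) (hlh : lo' ≤ hi) (hhl : hi ≤ idxs.length)
    (Hlt : ∀ s, s < lo' → v - idxs.getD s 0 > K)
    (Hge : ∀ s, lo' ≤ s → s < hi → ¬(v - idxs.getD s 0 > K)) :
    ((idxs.take hi).countP (fun j => !decide (v - j > K)) : Int) = (hi : Int) - (lo' : Int) := by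
  have hlen : (idxs.take hi).length = hi := by
    rw [List.length_take]; omega
  have hsplit : idxs.take hi = (idxs.take hi).take lo' ++ (idxs.take hi).drop lo' :=
    (List.take_append_drop _ _).symm
  have hlen1 : ((idxs.take hi).take lo').length = lo' := by
    rw [List.length_take]; omega
  have hlen2 : ((idxs.take hi).drop lo').length = hi - lo' := by
    rw [List.length_drop]; omega
  have hpart1 : ((idxs.take hi).take lo').countP (fun j => !decide (v - j > K)) = 0 := by
    rw [List.countP_eq_zero]
    intro a ha
    obtain ⟨i, hilt, hia⟩ := List.mem_iff_getElem.mp ha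
    rw [List.getElem_take, List.getElem_take] at hia
    have hilo : i < lo' := by omega
    have hik : v - idxs.getD i 0 > K := Hlt i hilo
    rw [List.getD_eq_getElem idxs 0 (by omega)] at hik
    rw [← hia]
    simp only [Bool.not_eq_true, Bool.not_eq_false', decide_eq_true_eq]
    omega
  have hpart2 : ((idxs.take hi).drop lo').countP (fun j => !decide (v - j > K)) = hi - lo' := by
    rw [← hlen2, List.countP_eq_length]
    intro a ha
    obtain ⟨i, hilt, hia⟩ := List.mem_iff_getElem.mp ha
    rw [List.getElem_drop, List.getElem_take] at hia
    have hs : lo' ≤ lo' + i := by omega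
    have hs2 : lo' + i < hi := by omega
    have hik : ¬(v - idxs.getD (lo' + i) 0 > K) := Hge (lo' + i) hs hs2
    rw [List.getD_eq_getElem idxs 0 (by omega)] at hik
    rw [← hia]
    simp only [Bool.not_eq_true', decide_eq_false_iff_not]
    omega
  have : (idxs.take hi).countP (fun j => !decide (v - j > K)) = hi - lo' := by
    conv_lhs => rw [hsplit]
    rw [List.countP_append, hpart1, hpart2]
    omega
  rw [this]
  omega

lemma cntS_eq_indexed (K : Int) :
    ∀ (l prev : List Int),
    cntS K prev l = ((List.range l.length).map (fun t =>
      (((prev ++ l.take t).countP (fun j => !decide (l.getD t 0 - j > K))) : Int))).sum := by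
  intro l
  induction l with
  | nil => intro prev; simp [cntS]
  | cons i r ih =>
    intro prev
    simp only [cntS, List.length_cons, List.range_succ_eq_map, List.map_cons, List.sum_cons,
      List.take_zero, List.append_nil, List.getD_cons_zero, List.map_map]
    congr 1
    rw [ih (prev ++ [i])]
    congr 1
    apply List.map_congr_left
    intro t _
    simp [Function.comp, List.append_assoc]

lemma pc_loop (K : Int) (idxs : List Int) (hsorted : idxs.Pairwise (· < ·)) :
    ∀ (n m lo : Nat) (acc : Int), m + n = idxs.length → lo ≤ m →
    (∀ s t : Nat, s < lo → m ≤ t → t < idxs.length → idxs.getD t 0 - idxs.getD s 0 > K) →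
    ((List.range' m n).foldl
      (fun st hi => ((loAdv K idxs hi st.1),
        st.2 + ((hi : Int) - ((loAdv K idxs hi st.1) : Int)))) (lo, acc)).2 =
      acc + ((List.range' m n).map (fun t =>
        (((idxs.take t).countP (fun j => !decide (idxs.getD t 0 - j > K))) : Int))).sum := by
  intro n
  induction n with
  | zero => intro m lo acc _ _ _; simp
  | succ n ih =>
    intro m lo acc hlen hlo hinv
    rw [List.range'_succ]
    simp only [List.foldl_cons, List.map_cons, List.sum_cons]
    obtain ⟨h1, h2, h3, h4⟩ := loAdv_spec K idxs m lo hlo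
    set lo' := loAdv K idxs m lo with hlo'def
    have hmlen : m < idxs.length := by omega
    -- everything strictly below lo' is > K away from every t ≥ m
    have Hlt : ∀ s, s < lo' → idxs.getD m 0 - idxs.getD s 0 > K := by
      intro s hs
      rcases Nat.lt_or_ge s lo with h | h
      · exact hinv s m h (le_refl m) hmlen
      · exact h3 s h hs
    have Hge : ∀ s, lo' ≤ s → s < m → ¬(idxs.getD m 0 - idxs.getD s 0 > K) := by
      intro s hs1 hs2
      have hlt : lo' < m := by omega
      have hK : ¬(idxs.getD m 0 - idxs.getD lo' 0 > K) := h4 hlt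
      have hmono : idxs.getD lo' 0 ≤ idxs.getD s 0 :=
        getD_mono_of_sorted idxs hsorted lo' s hs1 (by omega)
      omega
    have hcnt : ((idxs.take m).countP (fun j => !decide (idxs.getD m 0 - j > K)) : Int) =
        (m : Int) - (lo' : Int) :=
      countP_take_eq K (idxs.getD m 0) idxs m lo' h2 (by omega) Hlt Hge
    rw [ih (m + 1) lo' (acc + ((m : Int) - (lo' : Int))) (by omega) (by omega) ?_]
    · rw [hcnt]; ring
    · intro s t hs hmt htlen
      rcases Nat.lt_or_ge s lo with h | h
      · exact hinv s t h (by omega) htlen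
      · have hKm : idxs.getD m 0 - idxs.getD s 0 > K := h3 s h hs
        have hmono : idxs.getD m 0 ≤ idxs.getD t 0 :=
          getD_mono_of_sorted idxs hsorted m t (by omega) htlen
        omega

lemma pairCount_eq_cntS (K : Int) (idxs : List Int) (hs : idxs.Pairwise (· < ·)) :
    pairCount K idxs = cntS K [] idxs := by
  unfold pairCount
  rw [cntS_eq_indexed]
  have := pc_loop K idxs hs idxs.length 0 0 0 (by omega) (by omega) (fun s t h => by omega)
  rw [List.range_eq_range']
  simp only [List.nil_append] at this ⊢
  rw [show (fun (st : Nat × Int) (hi : Nat) =>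
      let lo := loAdv K idxs hi st.1
      (lo, st.2 + ((hi : Int) - (lo : Int)))) =
    (fun st hi => ((loAdv K idxs hi st.1),
      st.2 + ((hi : Int) - ((loAdv K idxs hi st.1) : Int)))) from rfl]
  rw [this]
  simp

-- ---------- B-side: the grouped fold equals RSum ----------

lemma groupB_getD (h : Int) :
    ∀ (E : List (Int × Int)) (d : PySem.Dict Int (List Int)),
    (E.foldl groupStep d).getD h [] = d.getD h [] ++ grp E h := by
  intro E
  induction E with
  | nil => intro d; simp [grp]
  | cons p E ih =>
    intro d
    simp only [List.foldl_cons, ih, groupStep]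
    rw [PySem.Dict.getD_modify]
    unfold grp
    by_cases hh : h = p.2
    · subst hh
      simp [List.filter_cons, List.append_assoc]
    · simp [List.filter_cons, show (p.2 == h) = false from by simpa using fun e => hh e.symm,
        hh]

-- fst components of grp lists are strictly increasing
lemma grp_sorted (E : List (Int × Int)) (hE : E.Pairwise (fun p q => p.1 < q.1)) (h : Int) :
    (grp E h).Pairwise (· < ·) := by
  unfold grp
  exact (hE.filter _).map _ (fun a b hab => hab)

lemma B_eq_RSum (N K : Int) (students : List Int) :
    solution_alt N K students = RSum K (PySem.List.enumerate students 0) := by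
  unfold solution_alt RSum
  have hE := PySem.List.pairwise_lt_enumerate students 0
  set E := PySem.List.enumerate students 0 with hEdef
  have hfold : E.foldl groupStep PySem.Dict.empty =
      E.foldl (fun d p => d.modify p.2 [] ((fun _ p cur => cur ++ [p.1]) d p)) PySem.Dict.empty := rfl
  have hkeys : (E.foldl groupStep PySem.Dict.empty).keys =
      PySem.Set.ofList (E.map (·.2)) := by
    rw [hfold, PySem.Dict.keys_foldl_modify_key E (·.2) ([] : List Int) _ PySem.Dict.empty,
      PySem.Dict.keys_empty, PySem.Set.update_nil_left]
  have hnodup : (E.foldl groupStep PySem.Dict.empty).keys.Nodup := by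
    rw [hfold]
    exact PySem.Dict.nodup_keys_foldl_modify_key E (·.2) ([] : List Int) _ PySem.Dict.empty
      (by rw [PySem.Dict.keys_empty]; exact List.nodup_nil)
  rw [PySem.List.foldl_add _ (fun idxs => pairCount K idxs) 0,
    PySem.Dict.values_eq_map_keys _ hnodup ([] : List Int), hkeys, List.map_map]
  rw [Int.zero_add]
  congr 1
  apply List.map_congr_left
  intro h hh
  have hgd : (E.foldl groupStep PySem.Dict.empty).getD h [] = grp E h := by
    rw [groupB_getD h E PySem.Dict.empty, PySem.Dict.getD_empty, List.nil_append]
  simp only [Function.comp]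
  rw [hgd, pairCount_eq_cntS K (grp E h) (grp_sorted E hE h)]

-- ===== VERDICT (by name: the statement is the Claim_ definition above) =====
theorem solution_spec : Claim_equal_solution := by
  intro N K students _
  unfold Spec_solution solution
  rw [A_loop K students 0 [] PySem.Dict.empty 0 (by simp) (by simp)
      (fun h => by simp [InvDh, PySem.Dict.get?_empty])]
  rw [B_eq_RSum N K students, ← ref_eq_RSum]
  simp
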